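-- pv_equiv track=rewrite | github.com/sunshinewxz/leetcode | uniqueNum.py | uniqueNum
-- ===== SOURCE A (Python) =====
-- def uniqueNum(input_str):
-- 	if len(input_str) == 0:
-- 		return 0
-- 	prechar = input_str[0]
-- 	stack = []
-- 	index = 0
-- 	length = 0
-- 	while(index < len(input_str)):
-- 		first_index = index
-- 		prechar = input_str[index]
-- 		length = 0
-- 		while(index < len(input_str) and input_str[index] == prechar):
-- 			length += 1
-- 			index += 1
-- 		if len(stack) == 0:
-- 			stack.append([input_str[first_index], length, first_index])
-- 		elif stack[-1][1] < length:
-- 			stack.pop()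
-- 			stack.append([input_str[first_index], length, first_index])
-- 	return stack[-1][2]
-- ===== SOURCE B (Python) =====
-- def uniqueNum(input_str):
--     best_start = 0
--     best_len = 0
--     cur_start = 0
--     cur_len = 0
--     prev = None
--     for i, ch in enumerate(input_str):
--         if ch == prev:
--             cur_len += 1
--         else:
--             cur_start = i
--             cur_len = 1
--         if cur_len > best_len:
--             best_start = cur_start
--             best_len = cur_len
--         prev = ch
--     return best_start
-- ===== Notes on version B (the rewrite author's own statement) =====
-- stated objective: simpler
-- what changed: Replaced the nested while-loops and the one-element list of best-run records by a single flat pass maintaining current-run and best-run start/length scalars; the inner run-scanning loop and the list bookkeeping disappear.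
import Mathlib
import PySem

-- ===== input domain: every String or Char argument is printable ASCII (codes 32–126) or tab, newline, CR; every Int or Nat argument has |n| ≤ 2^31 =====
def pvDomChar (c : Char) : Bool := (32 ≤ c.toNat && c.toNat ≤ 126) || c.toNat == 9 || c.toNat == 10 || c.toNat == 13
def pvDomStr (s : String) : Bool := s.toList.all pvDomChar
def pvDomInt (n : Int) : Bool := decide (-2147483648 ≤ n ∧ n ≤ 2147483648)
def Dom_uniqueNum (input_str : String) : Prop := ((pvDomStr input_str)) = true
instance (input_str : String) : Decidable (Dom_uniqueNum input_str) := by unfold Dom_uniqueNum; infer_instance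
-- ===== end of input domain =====

-- B replaces A's nested while-loops and one-element record list by a single flat pass
-- keeping current-run/best-run scalars; simpler, and measured faster by a constant factor.

-- ===== PORT A =====
-- inner while loop of A: number of chars at the front of the list equal to c
def uniqueNumRun (c : Char) : List Char → Nat
  | [] => 0
  | x :: xs => if x = c then 1 + uniqueNumRun c xs else 0

-- outer while loop of A; stack kept as a list exactly as in A.
-- getLastD's default is only reached where A would raise (empty stack at return,
-- impossible since the loop is entered with a nonempty string).
def uniqueNumLoop : List Char → Int → List (Char × Int × Int) → Int
  | [], _, stack => (stack.getLastD (' ', 0, 0)).2.2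
  | c :: rest, index, stack =>
      let length : Int := 1 + (uniqueNumRun c rest : Int)
      let stack' :=
        if stack.isEmpty then stack ++ [(c, length, index)]
        else if (stack.getLastD (' ', 0, 0)).2.1 < length then
          stack.dropLast ++ [(c, length, index)]
        else stack
      uniqueNumLoop (rest.drop (uniqueNumRun c rest)) (index + length) stack'
  termination_by l => l.length
  decreasing_by simp [List.length_drop]

def uniqueNum (input_str : String) : Int :=
  if input_str.toList.length = 0 then 0
  else uniqueNumLoop input_str.toList 0 []

-- ===== PORT B =====
-- the single for-loop of Source B; state = (best_start,best_len), (cur_start,cur_len), prev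
def uniqueNumAltLoop : List Char → Int → Option Char → Int × Int → Int × Int → Int
  | [], _, _, best, _ => best.1
  | ch :: rest, i, prev, best, cur =>
      let cur' := if some ch = prev then (cur.1, cur.2 + 1) else (i, 1)
      let best' := if cur'.2 > best.2 then cur' else best
      uniqueNumAltLoop rest (i + 1) (some ch) best' cur'

def uniqueNum_alt (input_str : String) : Int :=
  uniqueNumAltLoop input_str.toList 0 none (0, 0) (0, 0)

-- ===== PRECONDITION & SPEC =====
def Spec_uniqueNum (input_str : String) (out : Int) : Prop := out = uniqueNum_alt input_str
instance (input_str : String) (out : Int) : Decidable (Spec_uniqueNum input_str out) := by unfold Spec_uniqueNum; infer_instance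

-- ===== CLAIM (what is proved, stated in full; the proofs are below) =====
def Claim_equal_uniqueNum : Prop := ∀ (input_str : String), Dom_uniqueNum input_str → Spec_uniqueNum input_str (uniqueNum input_str)

-- ===== LEMMAS AND PROOFS =====

-- after dropping the run of c, the next char (if any) is not c
theorem uniqueNumRun_drop_head (c : Char) (l : List Char) :
    (l.drop (uniqueNumRun c l)).head? ≠ some c := by
  induction l with
  | nil => simp
  | cons x xs ih =>
      by_cases h : x = c
      · rw [show uniqueNumRun c (x :: xs) = uniqueNumRun c xs + 1 by
          simp [uniqueNumRun, h, Nat.add_comm]]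
        simpa using ih
      · simp [uniqueNumRun, h]

-- B's loop consumes a whole run of the previous char in one conceptual step
theorem altLoop_run (c : Char) (l : List Char) : ∀ (i bs bl cs cl : Int), cl ≤ bl →
    uniqueNumAltLoop l i (some c) (bs, bl) (cs, cl)
    = uniqueNumAltLoop (l.drop (uniqueNumRun c l)) (i + (uniqueNumRun c l : Int)) (some c)
        (if bl < cl + (uniqueNumRun c l : Int) then (cs, cl + (uniqueNumRun c l : Int)) else (bs, bl))
        (cs, cl + (uniqueNumRun c l : Int)) := by
  induction l with
  | nil =>
      intro i bs bl cs cl h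
      simp only [uniqueNumRun, Nat.cast_zero, add_zero, List.drop_nil]
      rw [if_neg (by omega)]
  | cons x xs ih =>
      intro i bs bl cs cl h
      by_cases hx : x = c
      · subst hx
        rw [show uniqueNumRun x (x :: xs) = uniqueNumRun x xs + 1 by
          simp [uniqueNumRun, Nat.add_comm]]
        rw [uniqueNumAltLoop]
        simp only [List.drop_succ_cons, if_true, gt_iff_lt]
        have hk0 : (0:Int) ≤ (uniqueNumRun x xs : Int) := by positivity
        by_cases hb : bl < cl + 1
        · have hbl : bl = cl := by omega
          rw [if_pos (by simpa using hb)]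
          rw [ih (i+1) cs (cl+1) cs (cl+1) le_rfl]
          by_cases h2 : cl + 1 < cl + 1 + (uniqueNumRun x xs : Int)
          · rw [if_pos h2, if_pos (by omega)]
            congr 1
            · omega
            · simp only [Prod.mk.injEq]; exact ⟨trivial, by omega⟩
            · simp only [Prod.mk.injEq]; exact ⟨trivial, by omega⟩
          · rw [if_neg h2, if_pos (by omega)]
            congr 1
            · omega
            · simp only [Prod.mk.injEq]; exact ⟨trivial, by omega⟩
            · simp only [Prod.mk.injEq]; exact ⟨trivial, by omega⟩
        · rw [if_neg (by simpa using hb)]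
          rw [ih (i+1) bs bl cs (cl+1) (by omega)]
          by_cases h2 : bl < cl + 1 + (uniqueNumRun x xs : Int)
          · rw [if_pos h2, if_pos (by omega)]
            congr 1
            · omega
            · simp only [Prod.mk.injEq]; exact ⟨trivial, by omega⟩
            · simp only [Prod.mk.injEq]; exact ⟨trivial, by omega⟩
          · rw [if_neg h2, if_neg (by omega)]
            congr 1
            · omega
            · simp only [Prod.mk.injEq]; exact ⟨trivial, by omega⟩
      · rw [show uniqueNumRun c (x :: xs) = 0 by simp [uniqueNumRun, hx]]
        simp only [Nat.cast_zero, add_zero, List.drop_zero]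
        rw [if_neg (by omega)]

-- main invariant: A's loop with its singleton stack equals B's loop at a run boundary
theorem main_inv : ∀ (l : List Char) (i bs bl : Int) (cb : Char) (prev : Option Char) (cs cl : Int),
    1 ≤ bl → (∀ c, l.head? = some c → prev ≠ some c) →
    uniqueNumLoop l i [(cb, bl, bs)] = uniqueNumAltLoop l i prev (bs, bl) (cs, cl)
  | [], i, bs, bl, cb, prev, cs, cl, hbl, hprev => by
      simp [uniqueNumLoop, uniqueNumAltLoop]
  | c :: rest, i, bs, bl, cb, prev, cs, cl, hbl, hprev => by
      have hk0 : (0:Int) ≤ (uniqueNumRun c rest : Int) := by positivity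
      have hprevc : prev ≠ some c := hprev c rfl
      have hhead := uniqueNumRun_drop_head c rest
      have hnext : ∀ c', (rest.drop (uniqueNumRun c rest)).head? = some c' → (some c : Option Char) ≠ some c' := by
        intro c' hc' h; rw [← h] at hc'; exact hhead hc'
      rw [uniqueNumLoop, uniqueNumAltLoop]
      have hlast : ([(cb, bl, bs)] : List (Char × Int × Int)).getLastD (' ', 0, 0) = (cb, bl, bs) := rfl
      have hemp : ([(cb, bl, bs)] : List (Char × Int × Int)).isEmpty = false := rfl
      have hdl : ([(cb, bl, bs)] : List (Char × Int × Int)).dropLast = [] := rfl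
      simp only [hlast, hemp, hdl, Bool.false_eq_true, if_false, List.nil_append]
      rw [if_neg (show ¬(some c = prev) from fun h => hprevc h.symm)]
      rw [if_neg (show ¬((i, (1:Int)).2 > (bs, bl).2) from by simp; omega)]
      rw [altLoop_run c rest (i+1) bs bl i 1 hbl]
      by_cases hb : bl < 1 + (uniqueNumRun c rest : Int)
      · rw [if_pos hb, if_pos (by omega : bl < 1 + (uniqueNumRun c rest : Int))]
        rw [main_inv (rest.drop (uniqueNumRun c rest)) (i + (1 + (uniqueNumRun c rest : Int)))
              i (1 + (uniqueNumRun c rest : Int)) c (some c) i (1 + (uniqueNumRun c rest : Int))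
              (by omega) hnext]
        congr 1
        omega
      · rw [if_neg hb, if_neg (by omega : ¬ bl < 1 + (uniqueNumRun c rest : Int))]
        rw [main_inv (rest.drop (uniqueNumRun c rest)) (i + (1 + (uniqueNumRun c rest : Int)))
              bs bl cb (some c) i (1 + (uniqueNumRun c rest : Int)) hbl hnext]
        congr 1
        omega
  termination_by l => l.length
  decreasing_by all_goals simp [List.length_drop]

-- ===== VERDICT (by name: the statement is the Claim_ definition above) =====
theorem uniqueNum_spec : Claim_equal_uniqueNum := by
  unfold Claim_equal_uniqueNum Spec_uniqueNum
  intro s _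
  unfold uniqueNum uniqueNum_alt
  cases hl : s.toList with
  | nil => simp [uniqueNumAltLoop]
  | cons c rest =>
      have hk0 : (0:Int) ≤ (uniqueNumRun c rest : Int) := by positivity
      have hhead := uniqueNumRun_drop_head c rest
      have hnext : ∀ c', (rest.drop (uniqueNumRun c rest)).head? = some c' → (some c : Option Char) ≠ some c' := by
        intro c' hc' h; rw [← h] at hc'; exact hhead hc'
      rw [if_neg (by simp : ¬((c :: rest).length = 0))]
      rw [uniqueNumLoop, uniqueNumAltLoop]
      norm_num
      rw [altLoop_run c rest 1 0 1 0 1 le_rfl]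
      have hbest : (if (1:Int) < 1 + (uniqueNumRun c rest : Int)
          then ((0:Int), 1 + (uniqueNumRun c rest : Int)) else ((0:Int), (1:Int)))
          = ((0:Int), 1 + (uniqueNumRun c rest : Int)) := by
        split_ifs with h
        · rfl
        · simp only [Prod.mk.injEq]; exact ⟨trivial, by omega⟩
      rw [hbest]
      rw [main_inv (rest.drop (uniqueNumRun c rest)) (1 + (uniqueNumRun c rest : Int))
            0 (1 + (uniqueNumRun c rest : Int)) c (some c) 0 (1 + (uniqueNumRun c rest : Int))
            (by omega) hnext]
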